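-- pv_equiv track=rewrite | github.com/aParr0t/advent_of_code | 2024/day 21/main.py | is_instr_valid
-- ===== SOURCE A (Python) =====
-- def is_instr_valid(s: str, start: tuple, bad: tuple):
--     x, y = start
--     for c in s:
--         match c:
--             case "v":
--                 y += 1
--             case "^":
--                 y -= 1
--             case ">":
--                 x += 1
--             case "<":
--                 x -= 1
--         if (x, y) == bad:
--             return False
--     return True
-- ===== SOURCE B (Python) =====
-- def _disp(s):
--     return (s.count(">") - s.count("<"), s.count("v") - s.count("^"))
--
-- def is_instr_valid(s: str, start: tuple, bad: tuple):
--     if len(s) == 0: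
--         return True
--     if len(s) == 1:
--         dx, dy = _disp(s)
--         return (start[0] + dx, start[1] + dy) != bad
--     mid = len(s) // 2
--     dx, dy = _disp(s[:mid])
--     return (is_instr_valid(s[:mid], start, bad)
--             and is_instr_valid(s[mid:], (start[0] + dx, start[1] + dy), bad))
-- ===== Notes on version B (the rewrite author's own statement) =====
-- stated objective: alternative
-- what changed: Replaces the left-to-right simulate-and-early-exit loop with a divide-and-conquer recursion: split the string in half, compute the left half's net displacement from character counts, and check both halves independently (positions of the whole path are the left half's positions followed by the right half's positions shifted by the left displacement).
import Mathlib
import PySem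

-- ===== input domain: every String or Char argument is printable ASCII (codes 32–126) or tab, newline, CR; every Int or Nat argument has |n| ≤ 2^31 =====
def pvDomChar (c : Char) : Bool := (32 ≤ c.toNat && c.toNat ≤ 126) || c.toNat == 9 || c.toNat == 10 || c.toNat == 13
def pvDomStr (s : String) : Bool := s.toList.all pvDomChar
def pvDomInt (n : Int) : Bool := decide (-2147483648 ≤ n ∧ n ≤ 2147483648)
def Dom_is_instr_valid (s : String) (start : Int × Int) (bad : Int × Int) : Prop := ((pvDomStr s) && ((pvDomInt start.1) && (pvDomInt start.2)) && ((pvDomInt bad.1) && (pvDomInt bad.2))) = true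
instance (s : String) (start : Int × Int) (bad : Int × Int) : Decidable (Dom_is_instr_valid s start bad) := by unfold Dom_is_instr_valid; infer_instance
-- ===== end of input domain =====

-- B replaces A's simulate-and-early-exit loop by a divide-and-conquer recursion: split the
-- string in half, shift the right half's start by the left half's net displacement (from
-- character counts), and check both halves (alternative decomposition; similar cost).

-- ===== PORT A =====
-- the loop over s with early 'return False' (match-case updates x,y in order, then the check)
def isInstrValidLoop (cs : List Char) (x y : Int) (bad : Int × Int) : Bool :=
  match cs with
  | [] => true
  | c :: rest =>
    let x' : Int := if c = '>' then x + 1 else if c = '<' then x - 1 else x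
    let y' : Int := if c = 'v' then y + 1 else if c = '^' then y - 1 else y
    if (x', y') = bad then false else isInstrValidLoop rest x' y' bad

def is_instr_valid (s : String) (start : Int × Int) (bad : Int × Int) : Bool :=
  isInstrValidLoop s.toList start.1 start.2 bad

-- ===== PORT B =====
-- _disp(s): net displacement from character counts (s.count(c) = List.count, exact on List Char)
def pvDisp (cs : List Char) : Int × Int :=
  ((cs.count '>' : Int) - (cs.count '<' : Int), (cs.count 'v' : Int) - (cs.count '^' : Int))

-- the divide-and-conquer recursion of Source B; s[:mid] / s[mid:] with 0 ≤ mid ≤ len are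
-- exactly List.take mid / List.drop mid
def isInstrValidRec (cs : List Char) (start : Int × Int) (bad : Int × Int) : Bool :=
  if cs.length = 0 then true
  else if cs.length = 1 then
    let d := pvDisp cs
    (start.1 + d.1, start.2 + d.2) ≠ bad
  else
    let mid := cs.length / 2
    let d := pvDisp (cs.take mid)
    isInstrValidRec (cs.take mid) start bad &&
      isInstrValidRec (cs.drop mid) (start.1 + d.1, start.2 + d.2) bad
termination_by cs.length
decreasing_by
  · simp only [List.length_take]; omega
  · simp only [List.length_drop]; omega

def is_instr_valid_alt (s : String) (start : Int × Int) (bad : Int × Int) : Bool :=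
  isInstrValidRec s.toList start bad

-- ===== PRECONDITION & SPEC =====
def Spec_is_instr_valid (s : String) (start : Int × Int) (bad : Int × Int) (out : Bool) : Prop := out = is_instr_valid_alt s start bad
instance (s : String) (start : Int × Int) (bad : Int × Int) (out : Bool) : Decidable (Spec_is_instr_valid s start bad out) := by unfold Spec_is_instr_valid; infer_instance

-- ===== CLAIM (what is proved, stated in full; the proofs are below) =====
def Claim_equal_is_instr_valid : Prop := ∀ (s : String) (start : Int × Int) (bad : Int × Int), Dom_is_instr_valid s start bad → Spec_is_instr_valid s start bad (is_instr_valid s start bad)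

-- ===== LEMMAS AND PROOFS =====
-- the x-coordinate A's loop reaches after one step, plus the rest's displacement
lemma disp_cons_x (c : Char) (rest : List Char) (x : Int) :
    x + (pvDisp (c :: rest)).1 =
      (if c = '>' then x + 1 else if c = '<' then x - 1 else x) + (pvDisp rest).1 := by
  simp only [pvDisp, List.count_cons]
  by_cases h1 : c = '>' <;> by_cases h2 : c = '<' <;> simp_all <;> ring

lemma disp_cons_y (c : Char) (rest : List Char) (y : Int) :
    y + (pvDisp (c :: rest)).2 =
      (if c = 'v' then y + 1 else if c = '^' then y - 1 else y) + (pvDisp rest).2 := by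
  simp only [pvDisp, List.count_cons]
  by_cases h1 : c = 'v' <;> by_cases h2 : c = '^' <;> simp_all <;> ring

-- A's loop splits at any list concatenation, shifting the start by the left displacement
lemma loop_append (l r : List Char) (x y : Int) (bad : Int × Int) :
    isInstrValidLoop (l ++ r) x y bad =
      (isInstrValidLoop l x y bad &&
        isInstrValidLoop r (x + (pvDisp l).1) (y + (pvDisp l).2) bad) := by
  induction l generalizing x y with
  | nil => simp [isInstrValidLoop, pvDisp]
  | cons c rest ih =>
    simp only [List.cons_append, isInstrValidLoop]
    by_cases hb : ((if c = '>' then x + 1 else if c = '<' then x - 1 else x),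
        (if c = 'v' then y + 1 else if c = '^' then y - 1 else y)) = bad
    · simp [hb]
    · simp [hb, ih, disp_cons_x c rest x, disp_cons_y c rest y]

lemma rec_eq_loop (cs : List Char) (start bad : Int × Int) :
    isInstrValidRec cs start bad = isInstrValidLoop cs start.1 start.2 bad := by
  induction hn : cs.length using Nat.strong_induction_on generalizing cs start with
  | _ n ih =>
  match cs, hn with
  | [], _ =>
    rw [isInstrValidRec]
    simp [isInstrValidLoop]
  | [c], hn1 =>
    subst hn1
    rw [isInstrValidRec]
    simp only [List.length_singleton]
    norm_num
    simp only [pvDisp, isInstrValidLoop, List.count_cons, List.count_nil]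
    by_cases h1 : c = '>' <;> by_cases h2 : c = '<' <;> by_cases h3 : c = 'v' <;>
      by_cases h4 : c = '^' <;> simp_all [sub_eq_add_neg]
  | c₁ :: c₂ :: rest, hn =>
    rw [isInstrValidRec]
    have hlen : (c₁ :: c₂ :: rest).length = n := hn
    have h2 : 2 ≤ n := by simp at hlen; omega
    simp only [hlen, if_neg (by omega : ¬ n = 0), if_neg (by omega : ¬ n = 1)]
    set l := (c₁ :: c₂ :: rest).take (n / 2) with hl
    set r := (c₁ :: c₂ :: rest).drop (n / 2) with hr
    have hll : l.length = n / 2 := by rw [hl, List.length_take]; omega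
    have hrl : r.length = n - n / 2 := by rw [hr, List.length_drop, hlen]
    have hA := ih l.length (by omega) l start rfl
    have hB := ih r.length (by omega) r
      (start.1 + (pvDisp l).1, start.2 + (pvDisp l).2) rfl
    rw [hA, hB]
    have hs := loop_append l r start.1 start.2 bad
    rw [List.take_append_drop] at hs
    exact hs.symm

-- ===== VERDICT (by name: the statement is the Claim_ definition above) =====
theorem is_instr_valid_spec : Claim_equal_is_instr_valid := by
  intro s start bad _
  unfold Spec_is_instr_valid is_instr_valid is_instr_valid_alt
  rw [rec_eq_loop]
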